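-- pv_equiv track=rewrite | github.com/FTDT-PyPSA/PyPSA-AR | scripts/network_500kv/09_map_generators.py | parse_area_data
-- ===== SOURCE A (Python) =====
-- def get_section(lines, begin_marker, end_marker):
--     inside = False
--     result = []
--     for line in lines:
--         if begin_marker in line:
--             inside = True
--             continue
--         if inside and end_marker in line:
--             break
--         if inside:
--             l = line.strip()
--             if l and not l.startswith('@') and not l.startswith('0 /'):
--                 result.append(l)
--     return result
--
-- def parse_area_data(lines):
--     """Parsea AREA DATA. Retorna dict area_id -> area_name."""
--     area_to_name = {}
--     for line in get_section(lines, 'BEGIN AREA DATA', 'END OF AREA DATA'):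
--         try:
--             q1 = line.index("'"); q2 = line.index("'", q1+1)
--             area_id   = int(line[:q1].strip().split(',')[0])
--             area_name = line[q1+1:q2].strip()
--             area_to_name[area_id] = area_name
--         except:
--             continue
--     return area_to_name
-- ===== SOURCE B (Python) =====
-- def parse_area_data(lines):
--     """Parsea AREA DATA. Retorna dict area_id -> area_name."""
--     area_to_name = {}
--     state = 0  # 0 = before the section, 1 = inside it, 2 = after it
--     for line in lines:
--         if state == 2:
--             continue
--         if 'BEGIN AREA DATA' in line:
--             state = 1
--             continue
--         if state == 0:
--             continue
--         if 'END OF AREA DATA' in line: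
--             state = 2
--             continue
--         l = line.strip()
--         if not l or l.startswith('@') or l.startswith('0 /'):
--             continue
--         q1 = l.find("'")
--         if q1 < 0:
--             continue
--         q2 = l.find("'", q1 + 1)
--         if q2 < 0:
--             continue
--         try:
--             area_id = int(l[:q1].strip().split(',')[0])
--         except ValueError:
--             continue
--         area_to_name[area_id] = l[q1 + 1:q2].strip()
--     return area_to_name
-- ===== Notes on version B (the rewrite author's own statement) =====
-- stated objective: alternative
-- what changed: Replaces the two-pass design (get_section builds an intermediate list of stripped lines, then a second loop parses them) with a single streaming pass driven by a three-state machine (before/inside/after the section) that parses each surviving line in place with explicit find-sentinel checks instead of index() under a bare except.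
import Mathlib
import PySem

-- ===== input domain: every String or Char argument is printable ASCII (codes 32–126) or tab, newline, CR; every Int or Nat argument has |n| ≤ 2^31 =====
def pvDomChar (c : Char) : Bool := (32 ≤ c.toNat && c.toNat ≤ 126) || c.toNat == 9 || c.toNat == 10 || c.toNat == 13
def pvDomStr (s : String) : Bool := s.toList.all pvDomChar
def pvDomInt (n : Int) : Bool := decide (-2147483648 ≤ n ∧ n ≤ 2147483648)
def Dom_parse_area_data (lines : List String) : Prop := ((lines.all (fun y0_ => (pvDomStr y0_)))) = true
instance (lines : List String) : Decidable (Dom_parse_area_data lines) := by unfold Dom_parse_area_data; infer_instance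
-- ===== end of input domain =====

-- B replaces A's two passes (get_section builds an intermediate list of stripped lines, a second
-- loop parses it) by one streaming pass with a three-state machine that parses each line in place.

-- ===== PORT A =====
-- get_section(lines, begin_marker, end_marker): loop with an inside flag, continue and break
def pvGetSectionGo (beginM endM : String) : List String → Bool → List String → List String
  | [], _, result => result
  | line :: rest, inside, result =>
    if PySem.Str.isIn beginM line then
      pvGetSectionGo beginM endM rest true result
    else if inside && PySem.Str.isIn endM line then
      result
    else if inside then
      let l := PySem.Str.strip line
      if !(l == "") && !(PySem.Str.startswith l "@") && !(PySem.Str.startswith l "0 /") then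
        pvGetSectionGo beginM endM rest inside (result ++ [l])
      else
        pvGetSectionGo beginM endM rest inside result
    else
      pvGetSectionGo beginM endM rest inside result

def pvGetSection (lines : List String) (beginM endM : String) : List String :=
  pvGetSectionGo beginM endM lines false []

-- body of A's parse loop; the bare except skips the line on any of the three possible raises
-- (index finding no first quote, index finding no second quote, int on a non-numeric field)
def pvParseLineA (d : PySem.Dict Int String) (line : String) : PySem.Dict Int String :=
  let q1 := PySem.Str.find line "'"                  -- line.index("'"): raises where find = -1
  if q1 < 0 then d
  else
    let q2 := PySem.Str.findFrom line "'" (q1 + 1)   -- line.index("'", q1+1)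
    if q2 < 0 then d
    else
      match PySem.Int.ofStr?
          (((PySem.Str.split? (PySem.Str.strip (PySem.Str.slice line none (some q1))) ",").getD []).headD "") with
      | none => d
      | some area_id =>
          PySem.Dict.insert d area_id (PySem.Str.strip (PySem.Str.slice line (some (q1 + 1)) (some q2)))

def parse_area_data (lines : List String) : List (Int × String) :=
  ((pvGetSection lines "BEGIN AREA DATA" "END OF AREA DATA").foldl pvParseLineA
    (PySem.Dict.empty : PySem.Dict Int String)).items

-- ===== PORT B =====
-- loop body of Source B's single pass: state 0 = before the section, 1 = inside, 2 = after
def pvStepB (st : PySem.Dict Int String × Nat) (line : String) : PySem.Dict Int String × Nat :=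
  let (d, state) := st
  if state == 2 then (d, state)
  else if PySem.Str.isIn "BEGIN AREA DATA" line then (d, 1)
  else if state == 0 then (d, state)
  else if PySem.Str.isIn "END OF AREA DATA" line then (d, 2)
  else
    let l := PySem.Str.strip line
    if l == "" || PySem.Str.startswith l "@" || PySem.Str.startswith l "0 /" then (d, state)
    else
      let q1 := PySem.Str.find l "'"
      if q1 < 0 then (d, state)
      else
        let q2 := PySem.Str.findFrom l "'" (q1 + 1)
        if q2 < 0 then (d, state)
        else
          match PySem.Int.ofStr?
              (((PySem.Str.split? (PySem.Str.strip (PySem.Str.slice l none (some q1))) ",").getD []).headD "") with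
          | none => (d, state)
          | some area_id =>
              (PySem.Dict.insert d area_id (PySem.Str.strip (PySem.Str.slice l (some (q1 + 1)) (some q2))), state)

def parse_area_data_alt (lines : List String) : List (Int × String) :=
  (lines.foldl pvStepB ((PySem.Dict.empty : PySem.Dict Int String), 0)).1.items

-- ===== PRECONDITION & SPEC =====
def Spec_parse_area_data (lines : List String) (out : List (Int × String)) : Prop := out = parse_area_data_alt lines
instance (lines : List String) (out : List (Int × String)) : Decidable (Spec_parse_area_data lines out) := by unfold Spec_parse_area_data; infer_instance

-- ===== CLAIM (what is proved, stated in full; the proofs are below) =====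
def Claim_equal_parse_area_data : Prop := ∀ (lines : List String), Dom_parse_area_data lines → Spec_parse_area_data lines (parse_area_data lines)

-- ===== LEMMAS AND PROOFS =====

-- while inside and before the end marker, B's step is: keep the line iff A's filter keeps it,
-- then run exactly A's per-line parse; the state stays 1
theorem pvStepB_inside (d : PySem.Dict Int String) (l : String)
    (hb : PySem.Str.isIn "BEGIN AREA DATA" l = false)
    (he : PySem.Str.isIn "END OF AREA DATA" l = false) :
    pvStepB (d, 1) l
      = (if !(PySem.Str.strip l == "") && !(PySem.Str.startswith (PySem.Str.strip l) "@")
            && !(PySem.Str.startswith (PySem.Str.strip l) "0 /")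
         then pvParseLineA d (PySem.Str.strip l) else d, 1) := by
  simp only [pvStepB, pvParseLineA, hb, he, Bool.false_eq_true, if_false, Nat.reduceBEq]
  cases ha : (PySem.Str.strip l == "") with
  | true => simp
  | false =>
    cases hA : PySem.Str.startswith (PySem.Str.strip l) "@" with
    | true => simp
    | false =>
      cases hZ : PySem.Str.startswith (PySem.Str.strip l) "0 /" with
      | true => simp
      | false =>
        simp only [Bool.or_self, Bool.not_false, Bool.and_self, Bool.false_eq_true,
          if_false, if_true]
        split_ifs with hq1 hq2
        · rfl
        · rfl
        · rcases hof : PySem.Int.ofStr?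
            (((PySem.Str.split? (PySem.Str.strip (PySem.Str.slice (PySem.Str.strip l) none
              (some (PySem.Str.find (PySem.Str.strip l) "'")))) ",").getD []).headD "") with _ | aid
          · simp only
          · simp only

-- the accumulated section is the already-kept lines followed by what the tail yields
theorem pvGetSectionGo_acc (beginM endM : String) (lines : List String) :
    ∀ inside result, pvGetSectionGo beginM endM lines inside result
      = result ++ pvGetSectionGo beginM endM lines inside [] := by
  induction lines with
  | nil => intro inside result; simp [pvGetSectionGo]
  | cons line rest ih =>
    intro inside result
    simp only [pvGetSectionGo]
    split_ifs with h1 h2 h3 h4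
    · exact ih _ _
    · simp
    · rw [ih inside (result ++ [PySem.Str.strip line]), ih inside ([] ++ [PySem.Str.strip line])]
      simp
    · exact ih _ _
    · exact ih _ _

-- the three states of B's streaming pass against A's two-pass pipeline, simultaneously
theorem pvPhases (lines : List String) :
    ∀ d : PySem.Dict Int String,
      ((pvGetSectionGo "BEGIN AREA DATA" "END OF AREA DATA" lines false []).foldl pvParseLineA d
          = (lines.foldl pvStepB (d, 0)).1)
      ∧ ((pvGetSectionGo "BEGIN AREA DATA" "END OF AREA DATA" lines true []).foldl pvParseLineA d
          = (lines.foldl pvStepB (d, 1)).1)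
      ∧ ((lines.foldl pvStepB (d, 2)).1 = d) := by
  induction lines with
  | nil => intro d; simp [pvGetSectionGo]
  | cons line rest ih =>
    intro d
    have hskip : ∀ d : PySem.Dict Int String, pvStepB (d, 2) line = (d, 2) := by
      intro d; rfl
    refine ⟨?_, ?_, ?_⟩
    · -- state 0 / inside = false
      cases hb : PySem.Str.isIn "BEGIN AREA DATA" line with
      | true =>
        have hstep : pvStepB (d, 0) line = (d, 1) := by simp only [pvStepB, hb]; rfl
        rw [List.foldl_cons, hstep]
        simp only [pvGetSectionGo, hb, if_true]
        exact (ih d).2.1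
      | false =>
        have hstep : pvStepB (d, 0) line = (d, 0) := by simp only [pvStepB, hb]; rfl
        rw [List.foldl_cons, hstep]
        simp only [pvGetSectionGo, hb, Bool.false_eq_true, if_false, Bool.false_and]
        exact (ih d).1
    · -- state 1 / inside = true
      cases hb : PySem.Str.isIn "BEGIN AREA DATA" line with
      | true =>
        have hstep : pvStepB (d, 1) line = (d, 1) := by simp only [pvStepB, hb]; rfl
        rw [List.foldl_cons, hstep]
        simp only [pvGetSectionGo, hb, if_true]
        exact (ih d).2.1
      | false =>
        cases he : PySem.Str.isIn "END OF AREA DATA" line with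
        | true =>
          have hstep : pvStepB (d, 1) line = (d, 2) := by simp only [pvStepB, hb, he]; rfl
          rw [List.foldl_cons, hstep]
          simp only [pvGetSectionGo, hb, he, Bool.false_eq_true, if_false, Bool.true_and, if_true]
          exact ((ih d).2.2).symm
        | false =>
          rw [List.foldl_cons, pvStepB_inside d line hb he]
          simp only [pvGetSectionGo, hb, he, Bool.false_eq_true, if_false, Bool.true_and, if_true]
          split_ifs with hk
          · rw [pvGetSectionGo_acc _ _ rest true ([] ++ [PySem.Str.strip line])]
            simp only [List.nil_append, List.singleton_append, List.foldl_cons]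
            exact (ih (pvParseLineA d (PySem.Str.strip line))).2.1
          · exact (ih d).2.1
    · -- state 2: every remaining line is skipped
      rw [List.foldl_cons, hskip]
      exact (ih d).2.2

-- ===== VERDICT (by name: the statement is the Claim_ definition above) =====
theorem parse_area_data_spec : Claim_equal_parse_area_data := by
  intro lines _
  unfold Spec_parse_area_data parse_area_data parse_area_data_alt pvGetSection
  rw [(pvPhases lines PySem.Dict.empty).1]
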